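-- pv_equiv track=rewrite | github.com/wxdangel-ship-it/Highway_Topo_Poc | src/highway_topo_poc/t01_fusion_qc/core.py | merge_true_runs
-- ===== SOURCE A (Python) =====
-- from typing import Any, Sequence
--
-- def merge_true_runs(flags: Sequence[bool], min_len: int = 1) -> list[tuple[int, int]]:
--     min_len = max(1, int(min_len))
--     out: list[tuple[int, int]] = []
--
--     start: int | None = None
--     for i, v in enumerate(flags):
--         if v and start is None:
--             start = i
--             continue
--         if (not v) and (start is not None):
--             if i - start >= min_len:
--                 out.append((start, i - 1))
--             start = None
--
--     if start is not None and len(flags) - start >= min_len: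
--         out.append((start, len(flags) - 1))
--
--     return out
-- ===== SOURCE B (Python) =====
-- def merge_true_runs(flags, min_len=1):
--     min_len = max(1, int(min_len))
--     n = len(flags)
--     # boundary detection: a run starts where a True has no True to its left,
--     # and ends where a True has no True to its right; pair them up in order.
--     starts = [i for i in range(n) if flags[i] and (i == 0 or not flags[i - 1])]
--     ends = [i for i in range(n) if flags[i] and (i == n - 1 or not flags[i + 1])]
--     return [(s, e) for s, e in zip(starts, ends) if e - s + 1 >= min_len]
-- ===== Notes on version B (the rewrite author's own statement) =====
-- stated objective: alternative
-- what changed: Replaces A's single-pass start/None state machine with staged boundary detection: collect run-start indices (True with no True to the left) and run-end indices (True with no True to the right), zip them into runs and filter by min_len.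
import Mathlib
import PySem

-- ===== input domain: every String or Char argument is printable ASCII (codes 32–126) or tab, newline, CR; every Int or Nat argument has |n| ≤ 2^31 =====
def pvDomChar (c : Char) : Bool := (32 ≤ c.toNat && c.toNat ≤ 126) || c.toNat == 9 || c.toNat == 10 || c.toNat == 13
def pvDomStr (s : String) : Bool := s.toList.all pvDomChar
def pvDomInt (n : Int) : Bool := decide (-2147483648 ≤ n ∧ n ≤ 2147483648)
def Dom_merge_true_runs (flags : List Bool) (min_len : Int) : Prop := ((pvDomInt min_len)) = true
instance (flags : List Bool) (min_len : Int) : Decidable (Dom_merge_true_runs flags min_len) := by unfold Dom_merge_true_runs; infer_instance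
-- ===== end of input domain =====

-- B replaces A's start/None state machine with staged boundary detection (collect run-start
-- and run-end indices by neighbour comparison, zip, filter by length); same O(n) cost.


-- ===== PORT A =====
-- A's loop over enumerate(flags), carrying (i, start, out); the post-loop tail append is
-- the base case (there i = len(flags), so len(flags) - start = i - start).
def mtrGo (m : Int) : List Bool → Int → Option Int → List (Int × Int) → List (Int × Int)
  | [], i, start, out =>
      match start with
      | some s => if i - s ≥ m then out ++ [(s, i - 1)] else out
      | none => out
  | v :: rest, i, start, out =>
      if v && start.isNone then mtrGo m rest (i + 1) (some i) out
      else if (!v) && start.isSome then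
        match start with
        | some s => mtrGo m rest (i + 1) none (if i - s ≥ m then out ++ [(s, i - 1)] else out)
        | none => mtrGo m rest (i + 1) none out
      else mtrGo m rest (i + 1) start out

def merge_true_runs (flags : List Bool) (min_len : Int) : List (Int × Int) :=
  mtrGo (max 1 min_len) flags 0 none []

-- ===== PORT B =====
-- Source B: starts/ends comprehensions over range(n) (indices always in range there, so getD
-- is exact), zip, filter by length; faithful to B's staged-pass structure.
def merge_true_runs_alt (flags : List Bool) (min_len : Int) : List (Int × Int) :=
  let m := max 1 min_len
  let n := flags.length
  let starts := (List.range n).filter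
    (fun i => flags.getD i false && (i == 0 || !(flags.getD (i - 1) false)))
  let ends := (List.range n).filter
    (fun i => flags.getD i false && (i == n - 1 || !(flags.getD (i + 1) false)))
  ((starts.zip ends).filter (fun p => (p.2 : Int) - (p.1 : Int) + 1 ≥ m)).map
    (fun p => ((p.1 : Int), (p.2 : Int)))

-- ===== PRECONDITION & SPEC =====
def Spec_merge_true_runs (flags : List Bool) (min_len : Int) (out : List (Int × Int)) : Prop := out = merge_true_runs_alt flags min_len
instance (flags : List Bool) (min_len : Int) (out : List (Int × Int)) : Decidable (Spec_merge_true_runs flags min_len out) := by unfold Spec_merge_true_runs; infer_instance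

-- ===== CLAIM (what is proved, stated in full; the proofs are below) =====
def Claim_equal_merge_true_runs : Prop := ∀ (flags : List Bool) (min_len : Int), Dom_merge_true_runs flags min_len → Spec_merge_true_runs flags min_len (merge_true_runs flags min_len)

-- ===== LEMMAS AND PROOFS =====

-- run-length encoding of flags into maximal (value, length) groups: the common spine
-- against which both ports are proved.
def bRuns : List Bool → List (Bool × Nat)
  | [] => []
  | v :: rest =>
      (v, (rest.takeWhile (· == v)).length + 1) :: bRuns (rest.dropWhile (· == v))
termination_by l => l.length
decreasing_by
  exact Nat.lt_succ_of_le (List.length_dropWhile_le _ _)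

-- the (start, end) index pairs of the True groups, offset by idx
def runPairs : Nat → List (Bool × Nat) → List (Nat × Nat)
  | _, [] => []
  | idx, (k, n) :: t => (if k then [(idx, idx + n - 1)] else []) ++ runPairs (idx + n) t

def runStarts : Nat → List (Bool × Nat) → List Nat
  | _, [] => []
  | idx, (k, _n) :: t => (if k then [idx] else []) ++ runStarts (idx + _n) t

def runEnds : Nat → List (Bool × Nat) → List Nat
  | _, [] => []
  | idx, (k, n) :: t => (if k then [idx + n - 1] else []) ++ runEnds (idx + n) t

-- ---- A-side: mtrGo = filtered runPairs ----

theorem mtrGo_false_block (m : Int) (xs ys : List Bool) (h : ∀ x ∈ xs, x = false)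
    (i : Int) (out : List (Int × Int)) :
    mtrGo m (xs ++ ys) i none out = mtrGo m ys (i + xs.length) none out := by
  induction xs generalizing i with
  | nil => simp
  | cons a t ih =>
      have ha : a = false := h a (List.mem_cons_self)
      subst ha
      simp only [List.cons_append, mtrGo, Option.isNone_none, Option.isSome_none,
        Bool.and_false, Bool.not_false, Bool.and_true]
      rw [if_neg (by simp), ih (fun x hx => h x (List.mem_cons_of_mem _ hx))]
      have : i + 1 + (t.length : Int) = i + ((false :: t : List Bool).length : Int) := by
        simp [List.length_cons]; ring
      rw [this]
      simp

theorem mtrGo_true_block (m : Int) (xs ys : List Bool) (h : ∀ x ∈ xs, x = true)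
    (i s : Int) (out : List (Int × Int)) :
    mtrGo m (xs ++ ys) i (some s) out = mtrGo m ys (i + xs.length) (some s) out := by
  induction xs generalizing i with
  | nil => simp
  | cons a t ih =>
      have ha : a = true := h a (List.mem_cons_self)
      subst ha
      simp only [List.cons_append, mtrGo, Option.isNone_some, Option.isSome_some,
        Bool.and_false, Bool.not_true, Bool.false_and]
      rw [if_neg (by simp), if_neg (by simp),
        ih (fun x hx => h x (List.mem_cons_of_mem _ hx))]
      have : i + 1 + (t.length : Int) = i + ((true :: t : List Bool).length : Int) := by
        simp [List.length_cons]; ring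
      rw [this]

theorem mtrGo_eq_runPairs (m : Int) : ∀ (fuel : Nat) (flags : List Bool), flags.length ≤ fuel →
    ∀ (idx : Nat) (out : List (Int × Int)),
    mtrGo m flags (idx : Int) none out
      = out ++ ((runPairs idx (bRuns flags)).filter
          (fun p => (p.2 : Int) - (p.1 : Int) + 1 ≥ m)).map
          (fun p => ((p.1 : Int), (p.2 : Int))) := by
  intro fuel
  induction fuel with
  | zero =>
      intro flags hf idx out
      have : flags = [] := List.eq_nil_of_length_eq_zero (Nat.le_zero.mp hf)
      subst this
      simp [mtrGo, bRuns, runPairs]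
  | succ f ih =>
      intro flags hf idx out
      match flags with
      | [] => simp [mtrGo, bRuns, runPairs]
      | v :: rest =>
        have hlen : (rest.dropWhile (· == v)).length ≤ f := by
          have h1 := List.length_dropWhile_le (· == v) rest
          have h2 : rest.length ≤ f := Nat.lt_succ_iff.mp (by simpa using hf)
          omega
        have hall : ∀ x ∈ rest.takeWhile (· == v), x = v := by
          intro x hx; simpa using List.mem_takeWhile_imp hx
        rw [show bRuns (v :: rest)
            = (v, (rest.takeWhile (· == v)).length + 1)
              :: bRuns (rest.dropWhile (· == v)) from by rw [bRuns]]
        cases v with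
        | false =>
            have step1 : mtrGo m (false :: rest) (idx : Int) none out
                = mtrGo m rest ((idx : Int) + 1) none out := by
              simp [mtrGo]
            rw [step1]
            conv_lhs => rw [← List.takeWhile_append_dropWhile (p := (· == false)) (l := rest)]
            rw [mtrGo_false_block m _ _ hall]
            rw [show (idx : Int) + 1 + ((rest.takeWhile (· == false)).length : Int)
                = ((idx + ((rest.takeWhile (· == false)).length + 1) : Nat) : Int) from by
              push_cast; ring]
            rw [ih _ hlen]
            rw [show runPairs idx ((false, (rest.takeWhile (· == false)).length + 1)
                  :: bRuns (rest.dropWhile (· == false)))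
                = runPairs (idx + ((rest.takeWhile (· == false)).length + 1))
                    (bRuns (rest.dropWhile (· == false))) from by
              rw [runPairs]; simp]
        | true =>
            have step1 : mtrGo m (true :: rest) (idx : Int) none out
                = mtrGo m rest ((idx : Int) + 1) (some idx) out := by
              simp [mtrGo]
            rw [step1]
            conv_lhs => rw [← List.takeWhile_append_dropWhile (p := (· == true)) (l := rest)]
            rw [mtrGo_true_block m _ _ hall]
            set t := rest.takeWhile (· == true) with ht
            set d := rest.dropWhile (· == true) with hd
            set L : Nat := t.length + 1 with hL
            have hiL : (idx : Int) + 1 + (t.length : Int) = ((idx + L : Nat) : Int) := by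
              rw [hL]; push_cast; ring
            have hcond : ∀ o : List (Int × Int),
                (if ((idx + L : Nat) : Int) - (idx : Int) ≥ m then
                  o ++ [((idx : Int), ((idx + L : Nat) : Int) - 1)] else o)
                = o ++ (if (((idx + L - 1 : Nat) : Int) - ((idx : Nat) : Int) + 1 ≥ m) then
                    [(((idx : Nat) : Int), ((idx + L - 1 : Nat) : Int))] else []) := by
              intro o
              have h1 : ((idx + L - 1 : Nat) : Int) = (idx : Int) + L - 1 := by
                have : 1 ≤ idx + L := by omega
                omega
              rw [h1]
              have h2 : ((idx + L : Nat) : Int) = (idx : Int) + L := by push_cast; ring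
              rw [h2]
              split_ifs with hA hB hB
              · rfl
              · exact absurd (by omega : (idx : Int) + L - 1 - idx + 1 ≥ m) hB
              · exact absurd (by omega : (idx : Int) + L - idx ≥ m) hA
              · simp
            rw [hiL]
            rw [show runPairs idx ((true, L) :: bRuns d)
                = (idx, idx + L - 1) :: runPairs (idx + L) (bRuns d) from by rw [runPairs]; simp]
            rw [List.filter_cons]
            cases hdd : d with
            | nil =>
                rw [show mtrGo m ([] : List Bool) ((idx + L : Nat) : Int) (some idx) out
                    = (if ((idx + L : Nat) : Int) - (idx : Int) ≥ m then
                        out ++ [((idx : Int), ((idx + L : Nat) : Int) - 1)] else out) from by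
                  simp [mtrGo]]
                rw [hcond out]
                rw [show bRuns ([] : List Bool) = [] from by rw [bRuns]]
                simp only [runPairs]
                split_ifs with hc <;> simp_all <;> omega
            | cons b dd =>
                have hb : b = false := by
                  have hh := List.head?_dropWhile_not (· == true) rest
                  rw [← hd, hdd] at hh
                  simpa using hh
                subst hb
                have stepA : mtrGo m (false :: dd) ((idx + L : Nat) : Int) (some idx) out
                    = mtrGo m dd (((idx + L : Nat) : Int) + 1) none
                      (if ((idx + L : Nat) : Int) - (idx : Int) ≥ m then
                        out ++ [((idx : Int), ((idx + L : Nat) : Int) - 1)] else out) := by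
                  simp [mtrGo]
                have stepB : ∀ o, mtrGo m (false :: dd) ((idx + L : Nat) : Int) none o
                    = mtrGo m dd (((idx + L : Nat) : Int) + 1) none o := by
                  intro o; simp [mtrGo]
                rw [stepA, ← stepB, ← hdd]
                rw [hcond out]
                rw [ih d (by rw [hdd] at hlen ⊢; simpa using hlen) (idx + L)]
                split_ifs with hc <;> simp_all <;> omega

-- ---- B-side: the boundary filters = runStarts / runEnds ----

-- the start/end boundary predicates of Source B's comprehensions
def pStart (l : List Bool) (i : Nat) : Bool :=
  l.getD i false && (i == 0 || !(l.getD (i - 1) false))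

def pEnd (l : List Bool) (i : Nat) : Bool :=
  l.getD i false && (i == l.length - 1 || !(l.getD (i + 1) false))

theorem uniform_getD (xs d : List Bool) (v : Bool) (h : ∀ x ∈ xs, x = v)
    (i : Nat) (hi : i < xs.length) : (xs ++ d).getD i false = v := by
  rw [List.getD_append _ _ _ _ hi, List.getD_eq_getElem _ _ hi]
  exact h _ (List.getElem_mem hi)

theorem shift_getD (xs d : List Bool) (i : Nat) :
    (xs ++ d).getD (xs.length + i) false = d.getD i false := by
  simp only [List.getD]
  rw [List.getElem?_append_right (Nat.le_add_right _ _)]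
  simp

theorem starts_block (v : Bool) (xs d : List Bool) (hxs : ∀ x ∈ xs, x = v)
    (hd : ∀ b, d.head? = some b → b = !v) (off : Nat) :
    ((List.range ((v :: xs) ++ d).length).filter (pStart ((v :: xs) ++ d))).map (off + ·)
      = (if v then [off] else [])
        ++ ((List.range d.length).filter (pStart d)).map ((off + (xs.length + 1)) + ·) := by
  have hxs' : ∀ x ∈ v :: xs, x = v := by
    intro x hx
    rcases List.mem_cons.mp hx with h | h
    · exact h
    · exact hxs x h
  rw [show ((v :: xs) ++ d).length = (xs.length + 1) + d.length from by simp; omega]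
  rw [List.range_add, List.filter_append, List.map_append]
  congr 1
  · -- the block part: only index 0 can be a run start
    have hrest : List.filter (pStart ((v :: xs) ++ d)) ((List.range xs.length).map Nat.succ)
        = [] := by
      apply List.filter_eq_nil_iff.mpr
      intro a ha
      simp only [List.mem_map, List.mem_range] at ha
      obtain ⟨j, hj, rfl⟩ := ha
      have h1 : ((v :: xs) ++ d).getD (j + 1) false = v :=
        uniform_getD (v :: xs) d v hxs' (j + 1) (by simp; omega)
      have h2 : ((v :: xs) ++ d).getD j false = v :=
        uniform_getD (v :: xs) d v hxs' j (by simp; omega)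
      simp only [pStart, h1]
      rw [show j + 1 - 1 = j from rfl, h2]
      cases v <;> simp
    have hp0 : pStart ((v :: xs) ++ d) 0 = v := by
      simp [pStart, List.cons_append]
    rw [List.range_succ_eq_map, List.filter_cons, hrest, hp0]
    cases v <;> simp
  · -- the shifted part: the predicate restricted to the tail is the tail's predicate
    rw [List.filter_map, List.map_map]
    have hcong : List.filter (pStart ((v :: xs) ++ d) ∘ (fun x => (xs.length + 1) + x))
          (List.range d.length)
        = List.filter (pStart d) (List.range d.length) := by
      apply List.filter_congr
      intro i hi
      simp only [List.mem_range] at hi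
      show pStart ((v :: xs) ++ d) ((xs.length + 1) + i) = pStart d i
      cases i with
      | zero =>
          cases d with
          | nil => simp at hi
          | cons b dd =>
              have hb := hd b rfl
              subst hb
              have hg0 : ((v :: xs) ++ (((!v) :: dd))).getD (xs.length + 1) false = !v := by
                have := shift_getD (v :: xs) (((!v) :: dd)) 0
                simpa using this
              have hgprev : ((v :: xs) ++ (((!v) :: dd))).getD xs.length false = v :=
                uniform_getD (v :: xs) (((!v) :: dd)) v hxs' xs.length (by simp)
              simp only [Nat.add_zero, pStart]
              rw [show xs.length + 1 - 1 = xs.length from rfl, hg0, hgprev]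
              cases v <;> simp
      | succ j =>
          have hgi2 : ((v :: xs) ++ d).getD ((xs.length + 1) + (j + 1)) false
              = d.getD (j + 1) false := by
            have := shift_getD (v :: xs) d (j + 1)
            simpa using this
          have hgj : ((v :: xs) ++ d).getD ((xs.length + 1) + j) false = d.getD j false := by
            have := shift_getD (v :: xs) d j
            simpa using this
          simp only [pStart]
          rw [show (xs.length + 1) + (j + 1) - 1 = (xs.length + 1) + j from by omega,
            hgi2, hgj]
          rw [show (xs.length + 1 + (j + 1) == 0) = false from
            beq_eq_false_iff_ne.mpr (by omega)]
          simp
    rw [hcong]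
    congr 1
    funext x
    simp [Nat.add_assoc]

theorem ends_block (v : Bool) (xs d : List Bool) (hxs : ∀ x ∈ xs, x = v)
    (hd : ∀ b, d.head? = some b → b = !v) (off : Nat) :
    ((List.range ((v :: xs) ++ d).length).filter (pEnd ((v :: xs) ++ d))).map (off + ·)
      = (if v then [off + xs.length] else [])
        ++ ((List.range d.length).filter (pEnd d)).map ((off + (xs.length + 1)) + ·) := by
  have hxs' : ∀ x ∈ v :: xs, x = v := by
    intro x hx
    rcases List.mem_cons.mp hx with h | h
    · exact h
    · exact hxs x h
  have hFlen : ((v :: xs) ++ d).length = (xs.length + 1) + d.length := by simp; omega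
  rw [hFlen, List.range_add, List.filter_append, List.map_append]
  congr 1
  · -- the block part: only the last block index can be a run end
    have hrest : List.filter (pEnd ((v :: xs) ++ d)) (List.range xs.length) = [] := by
      apply List.filter_eq_nil_iff.mpr
      intro j hj
      simp only [List.mem_range] at hj
      have h1 : ((v :: xs) ++ d).getD j false = v :=
        uniform_getD (v :: xs) d v hxs' j (by simp; omega)
      have h2 : ((v :: xs) ++ d).getD (j + 1) false = v :=
        uniform_getD (v :: xs) d v hxs' (j + 1) (by simp; omega)
      simp only [pEnd, h1, h2]
      rw [show (j == ((v :: xs) ++ d).length - 1) = false from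
        beq_eq_false_iff_ne.mpr (by rw [hFlen]; omega)]
      cases v <;> simp
    have hplast : pEnd ((v :: xs) ++ d) xs.length = v := by
      have h1 : ((v :: xs) ++ d).getD xs.length false = v :=
        uniform_getD (v :: xs) d v hxs' xs.length (by simp)
      cases d with
      | nil =>
          simp only [pEnd, h1]
          rw [show (xs.length == ((v :: xs) ++ ([] : List Bool)).length - 1) = true from by
            simp]
          simp
      | cons b dd =>
          have hb := hd b rfl
          subst hb
          have hg : ((v :: xs) ++ ((!v) :: dd)).getD (xs.length + 1) false = !v := by
            have := shift_getD (v :: xs) ((!v) :: dd) 0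
            simpa using this
          simp only [pEnd, h1, hg]
          cases v <;> simp
    rw [List.range_succ, List.filter_append, hrest, List.nil_append]
    rw [show List.filter (pEnd ((v :: xs) ++ d)) [xs.length]
        = if pEnd ((v :: xs) ++ d) xs.length then [xs.length] else [] from by
      rw [List.filter_cons]; simp]
    rw [hplast]
    cases v <;> simp
  · -- the shifted part
    rw [List.filter_map, List.map_map]
    have hcong : List.filter (pEnd ((v :: xs) ++ d) ∘ (fun x => (xs.length + 1) + x))
          (List.range d.length)
        = List.filter (pEnd d) (List.range d.length) := by
      apply List.filter_congr
      intro i hi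
      simp only [List.mem_range] at hi
      show pEnd ((v :: xs) ++ d) ((xs.length + 1) + i) = pEnd d i
      have hgi : ((v :: xs) ++ d).getD ((xs.length + 1) + i) false = d.getD i false := by
        have := shift_getD (v :: xs) d i
        simpa using this
      have hgi1 : ((v :: xs) ++ d).getD ((xs.length + 1) + i + 1) false
          = d.getD (i + 1) false := by
        have := shift_getD (v :: xs) d (i + 1)
        rw [show (v :: xs).length + (i + 1) = (xs.length + 1) + i + 1 from by simp; omega]
          at this
        exact this
      have hbeq : ((xs.length + 1) + i == ((v :: xs) ++ d).length - 1)
          = (i == d.length - 1) := by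
        have hiff : ((xs.length + 1) + i = ((v :: xs) ++ d).length - 1)
            ↔ (i = d.length - 1) := by rw [hFlen]; omega
        cases hcase : (i == d.length - 1) with
        | true => exact beq_iff_eq.mpr (hiff.mpr (by simpa using hcase))
        | false =>
            exact beq_eq_false_iff_ne.mpr
              (fun h => (beq_eq_false_iff_ne.mp hcase) (hiff.mp h))
      simp only [pEnd, hgi, hgi1, hbeq]
    rw [hcong]
    congr 1
    funext x
    simp [Nat.add_assoc]

theorem starts_eq : ∀ (fuel : Nat) (flags : List Bool), flags.length ≤ fuel → ∀ (off : Nat),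
    ((List.range flags.length).filter (pStart flags)).map (off + ·)
      = runStarts off (bRuns flags) := by
  intro fuel
  induction fuel with
  | zero =>
      intro flags hf off
      have : flags = [] := List.eq_nil_of_length_eq_zero (Nat.le_zero.mp hf)
      subst this; simp [bRuns, runStarts]
  | succ f ih =>
      intro flags hf off
      match flags with
      | [] => simp [bRuns, runStarts]
      | v :: rest =>
        have hdec : v :: rest = (v :: rest.takeWhile (· == v)) ++ rest.dropWhile (· == v) := by
          simp
        have hlen : (rest.dropWhile (· == v)).length ≤ f := by
          have h1 := List.length_dropWhile_le (· == v) rest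
          have h2 : rest.length ≤ f := Nat.lt_succ_iff.mp (by simpa using hf)
          omega
        have hxs : ∀ x ∈ rest.takeWhile (· == v), x = v := by
          intro x hx; simpa using List.mem_takeWhile_imp hx
        have hd : ∀ b, (rest.dropWhile (· == v)).head? = some b → b = !v := by
          intro b hb
          have h3 := List.head?_dropWhile_not (· == v) rest
          rw [hb] at h3
          have h4 : ¬ b = v := by simpa using h3
          revert h4; cases b <;> cases v <;> decide
        conv_lhs => rw [hdec]
        rw [starts_block v _ _ hxs hd off, ih _ hlen]
        rw [show bRuns (v :: rest)
            = (v, (rest.takeWhile (· == v)).length + 1)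
              :: bRuns (rest.dropWhile (· == v)) from by rw [bRuns]]
        rw [runStarts]

theorem ends_eq : ∀ (fuel : Nat) (flags : List Bool), flags.length ≤ fuel → ∀ (off : Nat),
    ((List.range flags.length).filter (pEnd flags)).map (off + ·)
      = runEnds off (bRuns flags) := by
  intro fuel
  induction fuel with
  | zero =>
      intro flags hf off
      have : flags = [] := List.eq_nil_of_length_eq_zero (Nat.le_zero.mp hf)
      subst this; simp [bRuns, runEnds]
  | succ f ih =>
      intro flags hf off
      match flags with
      | [] => simp [bRuns, runEnds]
      | v :: rest =>
        have hdec : v :: rest = (v :: rest.takeWhile (· == v)) ++ rest.dropWhile (· == v) := by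
          simp
        have hlen : (rest.dropWhile (· == v)).length ≤ f := by
          have h1 := List.length_dropWhile_le (· == v) rest
          have h2 : rest.length ≤ f := Nat.lt_succ_iff.mp (by simpa using hf)
          omega
        have hxs : ∀ x ∈ rest.takeWhile (· == v), x = v := by
          intro x hx; simpa using List.mem_takeWhile_imp hx
        have hd : ∀ b, (rest.dropWhile (· == v)).head? = some b → b = !v := by
          intro b hb
          have h3 := List.head?_dropWhile_not (· == v) rest
          rw [hb] at h3
          have h4 : ¬ b = v := by simpa using h3
          revert h4; cases b <;> cases v <;> decide
        conv_lhs => rw [hdec]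
        rw [ends_block v _ _ hxs hd off, ih _ hlen]
        rw [show bRuns (v :: rest)
            = (v, (rest.takeWhile (· == v)).length + 1)
              :: bRuns (rest.dropWhile (· == v)) from by rw [bRuns]]
        rw [runEnds]
        cases v <;> simp

theorem zip_starts_ends (g : List (Bool × Nat)) :
    ∀ idx, (runStarts idx g).zip (runEnds idx g) = runPairs idx g := by
  induction g with
  | nil => intro idx; simp [runStarts, runEnds, runPairs]
  | cons p t ih =>
      intro idx
      obtain ⟨k, n⟩ := p
      cases k <;> simp [runStarts, runEnds, runPairs, ih]

-- ===== VERDICT (by name: the statement is the Claim_ definition above) =====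
theorem merge_true_runs_spec : Claim_equal_merge_true_runs := by
  intro flags min_len _
  unfold Spec_merge_true_runs merge_true_runs
  simp only [merge_true_runs_alt]
  have hs := starts_eq flags.length flags le_rfl 0
  have he := ends_eq flags.length flags le_rfl 0
  rw [show ((0 : Nat) + ·) = (id : Nat → Nat) from by funext x; simp] at hs he
  rw [List.map_id] at hs he
  rw [show (fun i => flags.getD i false && (i == 0 || !(flags.getD (i - 1) false)))
      = pStart flags from rfl,
    show (fun i => flags.getD i false && (i == flags.length - 1 || !(flags.getD (i + 1) false)))
      = pEnd flags from rfl, hs, he, zip_starts_ends]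
  have hm := mtrGo_eq_runPairs (max 1 min_len) flags.length flags le_rfl 0 []
  simpa using hm
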